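-- pv_equiv track=rewrite | github.com/AbdelStark/zigrad | benchmarks/runners/pytorch/mnist_mlp.py | ring_skip_edges
-- ===== SOURCE A (Python) =====
-- def ring_skip_edges(node_count: int, fanout: int = 4):
--     src = []
--     tgt = []
--     for node in range(node_count):
--         src.extend([node] * fanout)
--         tgt.append(node)
--         tgt.append(node_count - 1 if node == 0 else node - 1)
--         tgt.append((node + 1) % node_count)
--         tgt.append((node + 2) % node_count)
--     return src, tgt
-- ===== SOURCE B (Python) =====
-- def ring_skip_edges(node_count: int, fanout: int = 4):
--     n = node_count
--     selfc = list(range(n))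
--     prev = [(i - 1) % n for i in range(n)]
--     nxt1 = [(i + 1) % n for i in range(n)]
--     nxt2 = [(i + 2) % n for i in range(n)]
--     tgt = [x for quad in zip(selfc, prev, nxt1, nxt2) for x in quad]
--     src = [node for node in range(n) for _ in range(fanout)]
--     return src, tgt
-- ===== Notes on version B (the rewrite author's own statement) =====
-- stated objective: alternative
-- what changed: Replaces the single per-node emission loop by building four ring-neighbor columns ((i-1)%n, (i+1)%n, (i+2)%n) over range(n) and interleaving them with zip, with src as one flat comprehension; the node-0 wraparound becomes the uniform (i-1)%n.
import Mathlib
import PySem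

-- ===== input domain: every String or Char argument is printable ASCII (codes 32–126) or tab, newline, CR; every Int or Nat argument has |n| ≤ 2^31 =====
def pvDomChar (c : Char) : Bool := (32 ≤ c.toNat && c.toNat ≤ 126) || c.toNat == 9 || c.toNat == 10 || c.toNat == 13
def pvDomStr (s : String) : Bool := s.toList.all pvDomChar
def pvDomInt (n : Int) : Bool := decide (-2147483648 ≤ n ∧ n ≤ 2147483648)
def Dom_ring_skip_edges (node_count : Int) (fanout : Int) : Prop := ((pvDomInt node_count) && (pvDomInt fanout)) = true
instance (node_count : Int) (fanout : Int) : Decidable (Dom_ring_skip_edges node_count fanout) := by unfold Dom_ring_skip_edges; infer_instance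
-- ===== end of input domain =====

-- B replaces A's single per-node emission loop by four ring-neighbor columns over range(n)
-- interleaved with zip (src as one flat comprehension); same cost, different decomposition.


-- ===== PORT A =====
def ring_skip_edges (node_count : Int) (fanout : Int) : List Int × List Int :=
  (PySem.List.pyRange 0 node_count 1).foldl
    (fun (st : List Int × List Int) node =>
      (st.1 ++ PySem.List.pyRepeat [node] fanout,
       st.2 ++ [node,
                if node == 0 then node_count - 1 else node - 1,
                PySem.Int.mod (node + 1) node_count,
                PySem.Int.mod (node + 2) node_count]))
    ([], [])

-- ===== PORT B =====
def ring_skip_edges_alt (node_count : Int) (fanout : Int) : List Int × List Int :=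
  let n := node_count
  let r := PySem.List.pyRange 0 n 1
  let selfc := r
  let prev := r.map (fun i => PySem.Int.mod (i - 1) n)
  let nxt1 := r.map (fun i => PySem.Int.mod (i + 1) n)
  let nxt2 := r.map (fun i => PySem.Int.mod (i + 2) n)
  let tgt := (selfc.zip (prev.zip (nxt1.zip nxt2))).flatMap
    (fun q => [q.1, q.2.1, q.2.2.1, q.2.2.2])
  let src := r.flatMap (fun node => (PySem.List.pyRange 0 fanout 1).map (fun _ => node))
  (src, tgt)

-- ===== PRECONDITION & SPEC =====
def Spec_ring_skip_edges (node_count : Int) (fanout : Int) (out : List Int × List Int) : Prop := out = ring_skip_edges_alt node_count fanout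
instance (node_count : Int) (fanout : Int) (out : List Int × List Int) : Decidable (Spec_ring_skip_edges node_count fanout out) := by unfold Spec_ring_skip_edges; infer_instance

-- ===== CLAIM (what is proved, stated in full; the proofs are below) =====
def Claim_equal_ring_skip_edges : Prop := ∀ (node_count : Int) (fanout : Int), Dom_ring_skip_edges node_count fanout → Spec_ring_skip_edges node_count fanout (ring_skip_edges node_count fanout)

-- ===== LEMMAS AND PROOFS =====

-- a foldl over a pair state whose components evolve independently splits into two foldls
theorem foldl_prod_split {α β γ : Type} (l : List γ) (g1 : α → γ → α) (g2 : β → γ → β)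
    (a : α) (b : β) :
    l.foldl (fun st x => (g1 st.1 x, g2 st.2 x)) (a, b) = (l.foldl g1 a, l.foldl g2 b) := by
  induction l generalizing a b with
  | nil => rfl
  | cons x xs ih => simpa using ih (g1 a x) (g2 b x)

-- interleaving four map-columns over the same base list is a flatMap of quadruples
theorem zip4_maps_flatMap {α : Type} (l : List α) (f g h : α → α) :
    (l.zip ((l.map f).zip ((l.map g).zip (l.map h)))).flatMap
      (fun q => [q.1, q.2.1, q.2.2.1, q.2.2.2])
      = l.flatMap (fun i => [i, f i, g i, h i]) := by
  induction l with
  | nil => rfl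
  | cons x xs ih => simp [ih]

theorem repeat_eq_map_range (node fanout : Int) :
    PySem.List.pyRepeat [node] fanout
      = (PySem.List.pyRange 0 fanout 1).map (fun _ => node) := by
  rw [PySem.List.pyRepeat_singleton, PySem.List.pyRange_one]
  simp [Function.comp_def]

theorem mod_sub_one (i n : Int) (h0 : 0 ≤ i) (hn : i < n) :
    PySem.Int.mod (i - 1) n = if i == 0 then n - 1 else i - 1 := by
  rw [PySem.Int.mod_eq_emod_of_pos (show (0:Int) < n by omega)]
  by_cases hi : i = 0
  · rw [hi]
    norm_num
    rw [show (-1:Int) = (n - 1) + n * (-1) by ring, Int.add_mul_emod_self_left,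
        Int.emod_eq_of_lt (by omega) (by omega)]
  · simp only [beq_iff_eq, if_neg hi]
    exact Int.emod_eq_of_lt (by omega) (by omega)

-- ===== VERDICT (by name: the statement is the Claim_ definition above) =====
theorem ring_skip_edges_spec : Claim_equal_ring_skip_edges := by
  intro n f _
  unfold Spec_ring_skip_edges ring_skip_edges ring_skip_edges_alt
  simp only []
  rw [foldl_prod_split (PySem.List.pyRange 0 n 1)
        (fun s node => s ++ PySem.List.pyRepeat [node] f)
        (fun s node => s ++ [node,
            if node == 0 then n - 1 else node - 1,
            PySem.Int.mod (node + 1) n,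
            PySem.Int.mod (node + 2) n]) [] [],
      zip4_maps_flatMap]
  simp only [Prod.mk.injEq]
  constructor
  · rw [PySem.List.foldl_append_eq_flatMap]
    simp only [List.nil_append]
    exact List.flatMap_congr (fun i _ => by rw [repeat_eq_map_range])
  · rw [PySem.List.foldl_append_eq_flatMap]
    simp only [List.nil_append]
    refine List.flatMap_congr (fun i hi => ?_)
    rw [PySem.List.mem_pyRange_one] at hi
    rw [mod_sub_one i n hi.1 hi.2]
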